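-- pv_equiv track=rewrite | github.com/hieuhhhhhhh/AylmerNails-server | src/routes/appointments/availability/helpers/space_to_slots.py | space_to_slots
-- ===== SOURCE A (Python) =====
-- def space_to_slots(space, planned_length, stored_intervals):
--     # result holder
--     slots = []
--
--     # calculate total gap to next and last endpoints
--     length = space[1] - space[0]
--
--     # iterate an ascending list of stored intervals
--     for interval in stored_intervals:
--
--         # calculate how much is the gap on the left of the slot (toward opening time)
--         left_gap = interval
--
--         # calculate how much is the gap on the right of the slot (toward closing time)
--         right_gap = length - left_gap - planned_length
--
--         # if the iteration has exceed threshold, break the loop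
--         if right_gap < left_gap:
--             break
--
--         # calculate and add 2 new slot to list
--         slot = space[0] + left_gap
--         slots.append(slot)
--
--         # mirrored version (right_gap swap to left_gap)
--         mirrored = space[0] + right_gap
--         if mirrored != slot:
--             slots.append(mirrored)
--
--     return sorted(slots)
-- ===== SOURCE B (Python) =====
-- def space_to_slots(space, planned_length, stored_intervals):
--     s0 = space[0]
--     # threshold: an interval i is taken iff 2*i <= T (i.e. its right gap >= left gap)
--     T = space[1] - s0 - planned_length
--     prefix = []
--     for i in stored_intervals:
--         if 2 * i > T:
--             break
--         prefix.append(i)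
--     prefix.sort()
--     # ascending left slots and ascending mirrored slots (mirrored skips self-mirrors)
--     lefts = [s0 + i for i in prefix]
--     rights = [s0 + T - i for i in reversed(prefix) if 2 * i != T]
--     # merge the two sorted sequences
--     out = []
--     a = b = 0
--     while a < len(lefts) and b < len(rights):
--         if lefts[a] <= rights[b]:
--             out.append(lefts[a]); a += 1
--         else:
--             out.append(rights[b]); b += 1
--     out += lefts[a:]
--     out += rights[b:]
--     return out
-- ===== Notes on version B (the rewrite author's own statement) =====
-- stated objective: alternative
-- what changed: Instead of appending slot/mirror pairs and running a general sort over all of them, B sorts only the taken prefix of intervals once and then merges the resulting ascending left-slot sequence with the ascending mirrored-slot sequence in one linear pass.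
import Mathlib
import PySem

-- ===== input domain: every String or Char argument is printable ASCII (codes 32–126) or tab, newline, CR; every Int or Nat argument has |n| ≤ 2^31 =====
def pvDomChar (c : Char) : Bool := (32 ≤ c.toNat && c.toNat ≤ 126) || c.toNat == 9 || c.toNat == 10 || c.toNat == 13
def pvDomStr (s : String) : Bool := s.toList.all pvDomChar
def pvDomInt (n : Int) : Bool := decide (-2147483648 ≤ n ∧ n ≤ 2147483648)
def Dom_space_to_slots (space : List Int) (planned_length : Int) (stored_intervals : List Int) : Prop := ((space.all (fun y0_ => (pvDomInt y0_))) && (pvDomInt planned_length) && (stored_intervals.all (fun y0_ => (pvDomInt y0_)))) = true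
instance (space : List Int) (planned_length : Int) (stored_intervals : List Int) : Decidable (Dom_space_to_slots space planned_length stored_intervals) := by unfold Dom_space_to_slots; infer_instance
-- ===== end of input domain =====

-- B replaces A's final general sort by one sort of the taken prefix followed by an
-- O(n) merge of the ascending left slots with the ascending mirrored slots (objective: alternative).

-- ===== PORT A =====
-- the for-loop over stored_intervals with its break, carrying the slots accumulator
def space_to_slots_loop (s0 length planned_length : Int) : List Int → List Int → List Int
  | [], slots => slots
  | interval :: rest, slots =>
    let left_gap := interval
    let right_gap := length - left_gap - planned_length
    if right_gap < left_gap then slots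
    else
      let slot := s0 + left_gap
      let slots1 := slots ++ [slot]
      let mirrored := s0 + right_gap
      let slots2 := if mirrored ≠ slot then slots1 ++ [mirrored] else slots1
      space_to_slots_loop s0 length planned_length rest slots2

def space_to_slots (space : List Int) (planned_length : Int) (stored_intervals : List Int) : List Int :=
  -- space[1]/space[0]: Pre_ guarantees both indices are in range (the .getD 0 is never taken)
  let s0 := (PySem.List.pyGet? space 0).getD 0
  let s1 := (PySem.List.pyGet? space 1).getD 0
  let length := s1 - s0
  PySem.List.sorted (space_to_slots_loop s0 length planned_length stored_intervals []) (fun x => x) false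

-- ===== PORT B =====
-- Source B's prefix loop: take intervals until 2*i > T
def stsAltPrefix (T : Int) : List Int → List Int
  | [] => []
  | i :: rest => if 2 * i > T then [] else i :: stsAltPrefix T rest

-- Source B's hand-written two-pointer merge of two sorted lists
def stsAltMerge : List Int → List Int → List Int
  | [], ys => ys
  | x :: xs, [] => x :: xs
  | x :: xs, y :: ys =>
    if x ≤ y then x :: stsAltMerge xs (y :: ys) else y :: stsAltMerge (x :: xs) ys

def space_to_slots_alt (space : List Int) (planned_length : Int) (stored_intervals : List Int) : List Int :=
  let s0 := (PySem.List.pyGet? space 0).getD 0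
  let T := (PySem.List.pyGet? space 1).getD 0 - s0 - planned_length
  let pfx := stsAltPrefix T stored_intervals
  let sp := PySem.List.sorted pfx (fun x => x) false
  let lefts := sp.map (fun i => s0 + i)
  let rights := (sp.reverse.filter (fun i => !(2 * i == T))).map (fun i => s0 + T - i)
  stsAltMerge lefts rights

-- ===== PRECONDITION & SPEC =====
-- Pre_ excludes only inputs where A raises IndexError: space[1] needs at least two elements.
def Pre_space_to_slots (space : List Int) (planned_length : Int) (stored_intervals : List Int) : Prop :=
  2 ≤ space.length
instance (space : List Int) (planned_length : Int) (stored_intervals : List Int) : Decidable (Pre_space_to_slots space planned_length stored_intervals) := by unfold Pre_space_to_slots; infer_instance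

def pvWitness_space_to_slots : List Int × Int × List Int := ([0, 100], 10, [0, 30])

def Spec_space_to_slots (space : List Int) (planned_length : Int) (stored_intervals : List Int) (out : List Int) : Prop := out = space_to_slots_alt space planned_length stored_intervals
instance (space : List Int) (planned_length : Int) (stored_intervals : List Int) (out : List Int) : Decidable (Spec_space_to_slots space planned_length stored_intervals out) := by unfold Spec_space_to_slots; infer_instance

-- ===== CLAIM (what is proved, stated in full; the proofs are below) =====
def Claim_equal_space_to_slots : Prop := ∀ (space : List Int) (planned_length : Int) (stored_intervals : List Int), Dom_space_to_slots space planned_length stored_intervals → Pre_space_to_slots space planned_length stored_intervals → Spec_space_to_slots space planned_length stored_intervals (space_to_slots space planned_length stored_intervals)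

-- ===== LEMMAS AND PROOFS =====

-- A's loop emits, for each interval of the prefix, the slot and (if distinct) its mirror.
theorem space_to_slots_loop_eq (s0 L pl : Int) (si : List Int) : ∀ acc : List Int,
    space_to_slots_loop s0 L pl si acc =
      acc ++ (stsAltPrefix (L - pl) si).flatMap
        (fun i => (s0 + i) :: (if 2 * i = L - pl then [] else [s0 + (L - pl) - i])) := by
  induction si with
  | nil => intro acc; simp [space_to_slots_loop, stsAltPrefix]
  | cons i rest ih =>
    intro acc
    by_cases h : L - i - pl < i
    · have h2 : 2 * i > L - pl := by omega
      simp [space_to_slots_loop, stsAltPrefix, h, h2]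
    · have h2 : ¬ (2 * i > L - pl) := by omega
      simp only [space_to_slots_loop, stsAltPrefix, if_neg h, if_neg h2, ih, List.flatMap_cons]
      by_cases hm2 : 2 * i = L - pl
      · have hm : ¬ (s0 + (L - i - pl) ≠ s0 + i) := by omega
        simp [hm, hm2]
      · have hm : s0 + (L - i - pl) ≠ s0 + i := by omega
        have he : s0 + (L - i - pl) = s0 + (L - pl) - i := by ring
        have hm' : s0 + (L - pl) - i ≠ s0 + i := by omega
        simp [hm2, he, hm']

-- Source B's merge is List.merge
theorem stsAltMerge_eq : ∀ xs ys : List Int,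
    stsAltMerge xs ys = List.merge xs ys (fun a b => decide (a ≤ b)) := by
  intro xs
  induction xs with
  | nil => intro ys; cases ys <;> simp [stsAltMerge]
  | cons x xs ihx =>
    intro ys
    induction ys with
    | nil => simp [stsAltMerge]
    | cons y ys ihy =>
      simp only [stsAltMerge, List.merge]
      by_cases h : x ≤ y
      · simp [h, ihx]
      · simp [h, ihy]

-- the flatMap of "cons then optional tail" splits into heads ++ tails, up to permutation
theorem flatMap_cons_perm (x : Int → Int) (g : Int → List Int) : ∀ l : List Int,
    (l.flatMap (fun i => x i :: g i)).Perm (l.map x ++ l.flatMap g) := by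
  intro l
  induction l with
  | nil => simp
  | cons a l ih =>
    simp only [List.flatMap_cons, List.map_cons, List.cons_append]
    refine List.Perm.cons _ ?_
    have h1 : (g a ++ l.flatMap fun i => x i :: g i).Perm (g a ++ (l.map x ++ l.flatMap g)) :=
      List.Perm.append_left _ ih
    have h2 : (g a ++ (l.map x ++ l.flatMap g)).Perm (l.map x ++ (g a ++ l.flatMap g)) := by
      rw [← List.append_assoc, ← List.append_assoc]
      exact List.Perm.append_right _ List.perm_append_comm
    exact h1.trans h2

-- a flatMap producing a singleton or nothing is a map over a filter
theorem flatMap_ite_singleton (T s0 : Int) : ∀ l : List Int,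
    (l.flatMap fun i => if 2 * i = T then [] else [s0 + T - i]) =
      (l.filter (fun i => !(2 * i == T))).map (fun i => s0 + T - i) := by
  intro l
  induction l with
  | nil => rfl
  | cons a l ih =>
    simp only [List.flatMap_cons, List.filter_cons]
    by_cases h : 2 * a = T
    · simp [h, ih]
    · simp [h, ih]

-- ===== VERDICT (by name: the statement is the Claim_ definition above) =====
theorem space_to_slots_spec : Claim_equal_space_to_slots := by
  intro space pl si _ hpre
  unfold Spec_space_to_slots
  match space, hpre with
  | a :: b :: rest, _ =>
    unfold space_to_slots space_to_slots_alt
    have e0 : PySem.List.pyGet? (a :: b :: rest) 0 = some a := by simp [pysem]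
    have e1 : PySem.List.pyGet? (a :: b :: rest) 1 = some b := by simp [pysem]
    simp only [e0, e1, Option.getD_some]
    rw [space_to_slots_loop_eq, List.nil_append]
    have hT : b - a - pl = (b - a) - pl := by ring
    rw [← hT]
    set T : Int := b - a - pl with hTdef
    set sp : List Int := PySem.List.sorted (stsAltPrefix T si) (fun x => x) false with hsp
    set lefts : List Int := sp.map (fun i => a + i) with hlefts
    set rights : List Int :=
      (sp.reverse.filter (fun i => !(2 * i == T))).map (fun i => a + T - i) with hrights
    have hsp_pw : sp.Pairwise (fun p q => p ≤ q) := PySem.List.sorted_pairwise _ (fun x => x)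
    have hl_pw : lefts.Pairwise (fun p q => p ≤ q) :=
      List.Pairwise.map _ (fun p q h => by omega) hsp_pw
    have hr_pw : rights.Pairwise (fun p q => p ≤ q) := by
      refine List.Pairwise.map (R := fun p q => q ≤ p) _ (fun p q h => by omega) ?_
      exact List.Pairwise.filter _ (List.pairwise_reverse.mpr hsp_pw)
    have hmerge_pw : (stsAltMerge lefts rights).Pairwise (fun p q => p ≤ q) := by
      rw [stsAltMerge_eq]
      exact List.Pairwise.merge hl_pw hr_pw
    have hperm : (stsAltMerge lefts rights).Perm
        ((stsAltPrefix T si).flatMap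
          (fun i => (a + i) :: (if 2 * i = T then [] else [a + T - i]))) := by
      have p1 : (stsAltMerge lefts rights).Perm (lefts ++ rights) := by
        rw [stsAltMerge_eq]; exact List.merge_perm_append _
      have p2 : rights.Perm (sp.flatMap fun i => if 2 * i = T then [] else [a + T - i]) := by
        rw [flatMap_ite_singleton, hrights, List.filter_reverse, List.map_reverse]
        exact List.reverse_perm _
      have p3 : (lefts ++ rights).Perm
          (sp.flatMap fun i => (a + i) :: (if 2 * i = T then [] else [a + T - i])) := by
        refine List.Perm.trans ?_ (flatMap_cons_perm _ _ sp).symm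
        exact List.Perm.append (by rw [hlefts]) p2
      have p4 := List.Perm.flatMap_right
        (fun i => (a + i) :: (if 2 * i = T then [] else [a + T - i]))
        (PySem.List.sorted_perm (stsAltPrefix T si) (fun x => x) false)
      exact (p1.trans p3).trans p4
    exact PySem.List.sorted_id_eq_of_perm_of_pairwise _ _ hperm hmerge_pw
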